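-- pv_equiv track=rewrite | github.com/nyankiti/algorithm_job | AOJ/Lesson-ALDS1/2_C_StableSort/answer.py | check_lists_stable
-- ===== SOURCE A (Python) =====
-- def check_lists_stable(original_li, sorted_li):
--     for i in range(1, 13):
--         original_result = []
--         sorted_result = []
--         # 番号ごとにまとめて、その順番が一致するかどうかでstableを判定する
--         for j in range(len(original_li)):
--             if int(original_li[j][1:]) == i:
--                 original_result.append(original_li[j])
--             if int(sorted_li[j][1:]) == i:
--                 sorted_result.append(sorted_li[j])
--         if original_result != sorted_result:
--             return False
--     return True
-- ===== SOURCE B (Python) =====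
-- def check_lists_stable(original_li, sorted_li):
--     # one pass: group both lists by card number, then compare the groups 1..12
--     orig_groups = {}
--     sorted_groups = {}
--     for a, b in zip(original_li, sorted_li):
--         orig_groups.setdefault(int(a[1:]), []).append(a)
--         sorted_groups.setdefault(int(b[1:]), []).append(b)
--     return all(orig_groups.get(i, []) == sorted_groups.get(i, []) for i in range(1, 13))
-- ===== Notes on version B (the rewrite author's own statement) =====
-- stated objective: faster
-- what changed: B groups both lists by card number in a single pass over zipped pairs using two dicts, then compares the twelve groups, instead of A's twelve full rescans of both lists with two int() parses per element per pass.
import Mathlib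
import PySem

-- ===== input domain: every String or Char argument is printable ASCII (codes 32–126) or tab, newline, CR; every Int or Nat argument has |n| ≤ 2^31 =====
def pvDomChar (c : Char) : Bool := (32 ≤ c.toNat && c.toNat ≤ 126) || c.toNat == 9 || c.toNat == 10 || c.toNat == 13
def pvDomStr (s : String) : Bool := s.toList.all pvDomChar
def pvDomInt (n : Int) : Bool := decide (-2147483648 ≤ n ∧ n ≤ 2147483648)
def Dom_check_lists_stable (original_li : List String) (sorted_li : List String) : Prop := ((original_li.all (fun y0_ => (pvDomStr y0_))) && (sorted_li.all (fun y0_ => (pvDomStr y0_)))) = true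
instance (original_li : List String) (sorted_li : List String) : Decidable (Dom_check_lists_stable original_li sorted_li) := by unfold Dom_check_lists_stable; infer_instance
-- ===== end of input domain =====

-- B builds the twelve per-number groups of both lists in ONE pass with two dicts and
-- compares them, instead of A's twelve rescans of both lists (fewer int() parses).

-- int(card[1:]) — shared key helper (none = ValueError)
def pvKey? (card : String) : Option Int := PySem.Int.ofStr? (PySem.Str.slice card (some 1) none)

-- ===== PORT A =====
-- the i-th pass of A's outer loop: build (original_result, sorted_result)
def pvPassA (original_li : List String) (sorted_li : List String) (i : Int) :
    List String × List String :=
  (PySem.List.pyRange 0 (PySem.List.len original_li) 1).foldl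
    (fun acc j =>
      let o := PySem.List.pyGetD original_li j ""
      let s := PySem.List.pyGetD sorted_li j ""
      (if pvKey? o = some i then acc.1 ++ [o] else acc.1,
       if pvKey? s = some i then acc.2 ++ [s] else acc.2))
    ([], [])

def check_lists_stable (original_li : List String) (sorted_li : List String) : Bool :=
  (PySem.List.pyRange 1 13 1).all (fun i =>
    let p := pvPassA original_li sorted_li i
    p.1 == p.2)  -- 'if original_result != sorted_result: return False' / final 'return True'

-- ===== PORT B =====
def check_lists_stable_alt (original_li : List String) (sorted_li : List String) : Bool :=
  let gs := (original_li.zip sorted_li).foldl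
    (fun (g : PySem.Dict Int (List String) × PySem.Dict Int (List String)) ab =>
      (g.1.modify ((pvKey? ab.1).getD 0) [] (· ++ [ab.1]),
       g.2.modify ((pvKey? ab.2).getD 0) [] (· ++ [ab.2])))
    (PySem.Dict.empty, PySem.Dict.empty)
  (PySem.List.pyRange 1 13 1).all (fun i => gs.1.getD i [] == gs.2.getD i [])

-- ===== PRECONDITION & SPEC =====
-- Pre_ excludes exactly the inputs on which A raises: an IndexError when sorted_li is
-- shorter than original_li, and a ValueError when some scanned card[1:] is not an int
-- literal (both surface during A's first pass, before any return).
def Pre_check_lists_stable (original_li : List String) (sorted_li : List String) : Prop :=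
  original_li.length ≤ sorted_li.length ∧
  (∀ x ∈ original_li, (pvKey? x).isSome) ∧
  (∀ x ∈ sorted_li.take original_li.length, (pvKey? x).isSome)
instance (original_li : List String) (sorted_li : List String) : Decidable (Pre_check_lists_stable original_li sorted_li) := by unfold Pre_check_lists_stable; infer_instance

def pvWitness_check_lists_stable : List String × List String :=
  (["H4", "C9", "S4", "D2"], ["D2", "H4", "S4", "C9"])

def Spec_check_lists_stable (original_li : List String) (sorted_li : List String) (out : Bool) : Prop := out = check_lists_stable_alt original_li sorted_li
instance (original_li : List String) (sorted_li : List String) (out : Bool) : Decidable (Spec_check_lists_stable original_li sorted_li out) := by unfold Spec_check_lists_stable; infer_instance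

-- ===== CLAIM (what is proved, stated in full; the proofs are below) =====
def Claim_equal_check_lists_stable : Prop := ∀ (original_li : List String) (sorted_li : List String), Dom_check_lists_stable original_li sorted_li → Pre_check_lists_stable original_li sorted_li → Spec_check_lists_stable original_li sorted_li (check_lists_stable original_li sorted_li)

-- ===== LEMMAS AND PROOFS =====

theorem pv_all_congr {α : Type} {l : List α} {f g : α → Bool}
    (h : ∀ x ∈ l, f x = g x) : l.all f = l.all g := by
  induction l with
  | nil => rfl
  | cons a t ih =>
    simp only [List.all_cons, h a (by simp), ih (fun x hx => h x (by simp [hx]))]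

-- B's grouping fold: each dict's group for key i is the filter of the scanned list
theorem pv_groups_getD (key : String → Int) (xs : List String)
    (d : PySem.Dict Int (List String)) (i : Int) :
    (xs.foldl (fun d x => d.modify (key x) [] (· ++ [x])) d).getD i [] =
      d.getD i [] ++ xs.filter (fun x => key x == i) := by
  induction xs generalizing d with
  | nil => simp
  | cons a t ih =>
    simp only [List.foldl_cons, List.filter_cons, ih]
    rw [PySem.Dict.getD_modify]
    by_cases h : i = key a
    · simp [h]
    · have : (key a == i) = false := by simp [Ne.symm h]
      simp [h, this]

theorem pv_map_snd_zip {α β : Type} (xs : List α) (ys : List β) :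
    (xs.zip ys).map Prod.snd = ys.take xs.length := by
  induction xs generalizing ys with
  | nil => simp
  | cons a t ih =>
    cases ys with
    | nil => simp
    | cons b u => simp [ih]

-- A's i-th pass, characterised: the two filters
theorem pv_passA_eq (o s : List String) (i : Int)
    (hlen : o.length ≤ s.length) :
    pvPassA o s i =
      (o.filter (fun x => decide (pvKey? x = some i)),
       (s.take o.length).filter (fun x => decide (pvKey? x = some i))) := by
  unfold pvPassA
  dsimp only
  rw [PySem.List.foldl_prod_mk
      (f := fun acc j => if pvKey? (PySem.List.pyGetD o j "") = some i
                         then acc ++ [PySem.List.pyGetD o j ""] else acc)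
      (g := fun acc j => if pvKey? (PySem.List.pyGetD s j "") = some i
                         then acc ++ [PySem.List.pyGetD s j ""] else acc)]
  simp only [Prod.mk.injEq]
  refine ⟨?_, ?_⟩
  · rw [show PySem.List.len o = PySem.List.len o from rfl]
    rw [PySem.List.foldl_pyRange_zero_pyGetD o "" (f := fun acc x => if pvKey? x = some i then acc ++ [x] else acc)]
    rw [PySem.List.foldl_append_ite_eq_filter]
    simp
  · have hteq : PySem.List.len o = PySem.List.len (s.take o.length) := by
      simp [PySem.List.len, hlen]
    rw [hteq]
    rw [PySem.List.foldl_congr_mem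
      (g := fun acc j => if pvKey? (PySem.List.pyGetD (s.take o.length) j "") = some i
                         then acc ++ [PySem.List.pyGetD (s.take o.length) j ""] else acc)]
    · rw [PySem.List.foldl_pyRange_zero_pyGetD (s.take o.length) ""
          (f := fun acc x => if pvKey? x = some i then acc ++ [x] else acc)]
      rw [PySem.List.foldl_append_ite_eq_filter]
      simp
    · intro acc j hj
      have hj' := (PySem.List.mem_pyRange_one).mp hj
      obtain ⟨n, rfl⟩ : ∃ n : ℕ, j = (n : Int) := ⟨j.toNat, by omega⟩
      have hlt : n < o.length := by
        have h2 := hj'.2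
        simp [PySem.List.len] at h2
        omega
      have hget : PySem.List.pyGetD s (n : Int) "" = PySem.List.pyGetD (s.take o.length) (n : Int) "" := by
        simp only [PySem.List.pyGetD_natCast]
        simp [List.getD_eq_getElem?_getD, List.getElem?_take_of_lt hlt]
      rw [hget]

theorem check_lists_stable_spec' (o s : List String)
    (hp : Pre_check_lists_stable o s) :
    check_lists_stable o s = check_lists_stable_alt o s := by
  obtain ⟨hlen, ho, hs⟩ := hp
  unfold check_lists_stable check_lists_stable_alt
  dsimp only
  apply pv_all_congr
  intro i hi
  have hsplit : (o.zip s).foldl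
      (fun (g : PySem.Dict Int (List String) × PySem.Dict Int (List String)) ab =>
        (g.1.modify ((pvKey? ab.1).getD 0) [] (· ++ [ab.1]),
         g.2.modify ((pvKey? ab.2).getD 0) [] (· ++ [ab.2])))
      (PySem.Dict.empty, PySem.Dict.empty) =
      ((o.zip s).foldl (fun d ab => PySem.Dict.modify d ((pvKey? ab.1).getD 0) [] (· ++ [ab.1])) PySem.Dict.empty,
       (o.zip s).foldl (fun d ab => PySem.Dict.modify d ((pvKey? ab.2).getD 0) [] (· ++ [ab.2])) PySem.Dict.empty) :=
    PySem.List.foldl_prod_mk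
      (fun d (ab : String × String) => PySem.Dict.modify d ((pvKey? ab.1).getD 0) [] (· ++ [ab.1]))
      (fun d (ab : String × String) => PySem.Dict.modify d ((pvKey? ab.2).getD 0) [] (· ++ [ab.2]))
      (o.zip s) PySem.Dict.empty PySem.Dict.empty
  rw [hsplit, pv_passA_eq o s i hlen]
  -- left fold over zip, keyed by fst
  have hofst : (o.zip s).map Prod.fst = o := List.map_fst_zip hlen
  have hosnd : (o.zip s).map Prod.snd = s.take o.length := pv_map_snd_zip o s
  have h1 : ((o.zip s).foldl (fun d ab => PySem.Dict.modify d ((pvKey? ab.1).getD 0) [] (· ++ [ab.1])) PySem.Dict.empty).getD i [] = o.filter (fun x => ((pvKey? x).getD 0) == i) := by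
    have := pv_groups_getD (fun x => (pvKey? x).getD 0) ((o.zip s).map Prod.fst) PySem.Dict.empty i
    rw [List.foldl_map] at this
    rw [hofst] at this
    simpa using this
  have h2 : ((o.zip s).foldl (fun d ab => PySem.Dict.modify d ((pvKey? ab.2).getD 0) [] (· ++ [ab.2])) PySem.Dict.empty).getD i [] = (s.take o.length).filter (fun x => ((pvKey? x).getD 0) == i) := by
    have := pv_groups_getD (fun x => (pvKey? x).getD 0) ((o.zip s).map Prod.snd) PySem.Dict.empty i
    rw [List.foldl_map] at this
    rw [hosnd] at this
    simpa using this
  simp only [h1, h2]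
  -- under Pre_, the keys all parse, so the two filter predicates agree
  have hfo : o.filter (fun x => decide (pvKey? x = some i)) = o.filter (fun x => ((pvKey? x).getD 0) == i) := by
    apply List.filter_congr
    intro x hx
    obtain ⟨k, hk⟩ := Option.isSome_iff_exists.mp (ho x hx)
    by_cases h : k = i <;> simp [hk, h]
  have hfs : (s.take o.length).filter (fun x => decide (pvKey? x = some i)) = (s.take o.length).filter (fun x => ((pvKey? x).getD 0) == i) := by
    apply List.filter_congr
    intro x hx
    obtain ⟨k, hk⟩ := Option.isSome_iff_exists.mp (hs x hx)
    by_cases h : k = i <;> simp [hk, h]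
  rw [hfo, hfs]

-- ===== VERDICT (by name: the statement is the Claim_ definition above) =====
theorem check_lists_stable_spec : Claim_equal_check_lists_stable := by
  intro o s _ hp
  exact check_lists_stable_spec' o s hp
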